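-- pv_equiv track=rewrite | github.com/miliar/Code_Jam_Webscraper | solutions_python/Problem_1/640.py | count_jumps
-- ===== SOURCE A (Python) =====
-- def count_jumps(engines, queries):
--   jumps = []
--   for q in range(len(queries)):
--     longest = 0
--     for i in range(len(engines)):
--       for j in range(q, len(queries)):
--         if queries[j] == engines[i]: break
--         if j - q + 1 > longest: longest = j - q + 1
--     jumps.append(longest)
--   return jumps
-- ===== SOURCE B (Python) =====
-- def count_jumps(engines, queries):
--     need = set(engines)
--     n = len(queries)
--     if not need:
--         return [0] * n
--     nxt = {}
--     res = []
--     for q in range(n - 1, -1, -1):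
--         x = queries[q]
--         if x in need:
--             nxt[x] = q
--         res.append(max(nxt.get(e, n) for e in need) - q)
--     res.reverse()
--     return res
-- ===== Notes on version B (the rewrite author's own statement) =====
-- stated objective: faster
-- what changed: Replaces the per-query, per-engine forward rescans (triple nested loop) by one backward sweep that maintains a dict of each engine's next occurrence and takes a max over the distinct engines per query.
import Mathlib
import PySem

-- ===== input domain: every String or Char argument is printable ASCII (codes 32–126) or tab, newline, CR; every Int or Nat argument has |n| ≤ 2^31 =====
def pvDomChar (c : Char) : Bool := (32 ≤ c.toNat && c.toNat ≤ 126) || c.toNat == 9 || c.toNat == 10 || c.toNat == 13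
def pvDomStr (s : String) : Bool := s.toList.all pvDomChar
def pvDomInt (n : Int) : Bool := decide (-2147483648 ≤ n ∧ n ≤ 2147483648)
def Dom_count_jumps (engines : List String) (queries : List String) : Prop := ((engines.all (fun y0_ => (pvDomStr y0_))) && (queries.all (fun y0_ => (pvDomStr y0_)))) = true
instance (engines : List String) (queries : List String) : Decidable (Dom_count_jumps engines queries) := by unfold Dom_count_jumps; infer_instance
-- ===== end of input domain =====

-- B replaces A's per-query, per-engine forward rescans by one backward sweep over the queries
-- maintaining a dict of each engine's next occurrence (objective: faster).


-- ===== PORT A =====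
-- inner loop 'for j in range(q, len(queries)): if queries[j] == engines[i]: break; …'
-- (the index j drawn from range(q, len(queries)) is always in range, so pyGetD is exact here)
def aInner (e : String) (queries : List String) (q : Int) (js : List Int) (longest : Int) : Int :=
  match js with
  | [] => longest
  | j :: rest =>
    if PySem.List.pyGetD queries j "" = e then longest
    else aInner e queries q rest (if j - q + 1 > longest then j - q + 1 else longest)

def count_jumps (engines : List String) (queries : List String) : List Int :=
  (PySem.List.pyRange 0 (PySem.List.len queries) 1).foldl (fun jumps q =>
    jumps ++ [(PySem.List.pyRange 0 (PySem.List.len engines) 1).foldl (fun longest i =>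
      aInner (PySem.List.pyGetD engines i "") queries q
        (PySem.List.pyRange q (PySem.List.len queries) 1) longest) 0]) []

-- ===== PORT B =====
-- Python's max(<nonempty iterable of ints>); only called on a nonempty list in count_jumps_alt
def pyMaxD (vals : List Int) : Int :=
  match vals with
  | [] => 0
  | v :: t => t.foldl max v

def count_jumps_alt (engines : List String) (queries : List String) : List Int :=
  let need : PySem.Set String := PySem.Set.ofList engines
  let n : Int := PySem.List.len queries
  if need.isEmpty then PySem.List.pyRepeat [(0 : Int)] n
  else
    let fin := (PySem.List.pyRange (n - 1) (-1) (-1)).foldl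
      (fun (acc : List Int × PySem.Dict String Int) q =>
        let x := PySem.List.pyGetD queries q ""
        let nxt := if PySem.Set.contains need x then acc.2.insert x q else acc.2
        let best := pyMaxD (need.map (fun e => nxt.getD e n))
        (acc.1 ++ [best - q], nxt))
      ([], PySem.Dict.empty)
    fin.1.reverse

-- ===== PRECONDITION & SPEC =====
def Spec_count_jumps (engines : List String) (queries : List String) (out : List Int) : Prop := out = count_jumps_alt engines queries
instance (engines : List String) (queries : List String) (out : List Int) : Decidable (Spec_count_jumps engines queries out) := by unfold Spec_count_jumps; infer_instance

-- ===== CLAIM (what is proved, stated in full; the proofs are below) =====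
def Claim_equal_count_jumps : Prop := ∀ (engines : List String) (queries : List String), Dom_count_jumps engines queries → Spec_count_jumps engines queries (count_jumps engines queries)

-- ===== LEMMAS AND PROOFS =====

-- index of the first occurrence of e in queries at position ≥ q (= queries.length if none)
def nxtIdx (queries : List String) (e : String) (q : Nat) : Nat :=
  q + (queries.drop q).idxOf e

lemma nxtIdx_ge (queries : List String) (e : String) (q : Nat) : q ≤ nxtIdx queries e q := by
  simp [nxtIdx]

lemma nxtIdx_rec (queries : List String) (e : String) (q : Nat) (h : q < queries.length) :
    nxtIdx queries e q = if queries[q] = e then q else nxtIdx queries e (q + 1) := by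
  have hdrop := List.drop_eq_getElem_cons (l := queries) h
  unfold nxtIdx
  rw [hdrop, List.idxOf_cons]
  by_cases hx : queries[q] = e
  · simp [hx]
  · have hb : (queries[q] == e) = false := by simp [hx]
    simp only [hb, cond_false, hx, if_false]
    omega

lemma nxtIdx_len (queries : List String) (e : String) :
    nxtIdx queries e queries.length = queries.length := by
  simp [nxtIdx]

-- A's inner loop computes max longest (nxtIdx - q)
lemma aInner_eq (queries : List String) (e : String) (q : Nat) :
    ∀ (k j : Nat), j ≤ queries.length → queries.length - j = k → ∀ L : Int, (j : Int) - q ≤ L →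
    aInner e queries q (PySem.List.pyRange j queries.length 1) L
      = max L ((nxtIdx queries e j : Int) - q) := by
  intro k
  induction k with
  | zero =>
    intro j hj hk L hL
    have hj' : j = queries.length := by omega
    subst hj'
    rw [PySem.List.pyRange_one_eq_nil (by omega)]
    rw [nxtIdx_len]
    simp only [aInner]
    rw [max_eq_left (by omega)]
  | succ k ih =>
    intro j hj hk L hL
    have hjlt : j < queries.length := by omega
    rw [PySem.List.pyRange_one_cons (by exact_mod_cast hjlt)]
    simp only [aInner]
    have hget : PySem.List.pyGetD queries (j : Int) "" = queries[j] := by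
      rw [PySem.List.pyGetD_natCast]
      exact List.getD_eq_getElem _ _ hjlt
    rw [hget, nxtIdx_rec queries e j hjlt]
    by_cases hx : queries[j] = e
    · rw [if_pos hx, if_pos hx, max_eq_left (by omega)]
    · rw [if_neg hx, if_neg hx]
      have hcast : (j : Int) + 1 = ((j + 1 : Nat) : Int) := by push_cast; ring
      have hge : ((j + 1 : Nat) : Int) ≤ (nxtIdx queries e (j + 1) : Int) := by
        exact_mod_cast nxtIdx_ge queries e (j + 1)
      by_cases hgt : (j : Int) - q + 1 > L
      · rw [if_pos hgt, hcast, ih (j + 1) (by omega) (by omega) _ (by push_cast; omega)]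
        rw [max_eq_right (by push_cast at hge ⊢; omega),
            max_eq_right (by push_cast at hge ⊢; omega)]
      · rw [if_neg hgt, hcast, ih (j + 1) (by omega) (by omega) _ (by push_cast; omega)]
  -- done

-- A's middle loop is a running max over the engines list
lemma aMiddle_fold (engines queries : List String) (q : Nat) (hq : q ≤ queries.length) :
    ∀ L : Int, 0 ≤ L →
    engines.foldl (fun longest e =>
      aInner e queries q (PySem.List.pyRange q queries.length 1) longest) L
    = engines.foldl (fun L e => max L ((nxtIdx queries e q : Int) - q)) L := by
  induction engines with
  | nil => intro L _; rfl
  | cons e es ih =>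
    intro L hL
    simp only [List.foldl_cons]
    rw [aInner_eq queries e q (queries.length - q) q hq rfl L (by omega)]
    have hge : (q : Int) ≤ (nxtIdx queries e q : Int) := by exact_mod_cast nxtIdx_ge queries e q
    exact ih _ (by omega)

lemma aMiddle_eq (engines queries : List String) (q : Nat) (hq : q ≤ queries.length) :
    (PySem.List.pyRange 0 (engines.length : Int) 1).foldl (fun longest i =>
      aInner (PySem.List.pyGetD engines i "") queries q
        (PySem.List.pyRange q (queries.length : Int) 1) longest) 0
    = engines.foldl (fun L e => max L ((nxtIdx queries e q : Int) - q)) 0 := by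
  rw [PySem.List.foldl_pyRange_zero_pyGetD' engines ""
    (fun longest e => aInner e queries q (PySem.List.pyRange q (queries.length : Int) 1) longest) 0]
  exact aMiddle_fold engines queries q hq 0 le_rfl

-- a running max over a projection is the init or one of the projected values
lemma foldl_max_proj_mem (l : List String) (f : String → Int) (c : Int) :
    l.foldl (fun m e => max m (f e)) c = c ∨ ∃ e ∈ l, l.foldl (fun m e => max m (f e)) c = f e := by
  induction l generalizing c with
  | nil => exact Or.inl rfl
  | cons x xs ih =>
    simp only [List.foldl_cons]
    rcases ih (max c (f x)) with h | ⟨e, he, hev⟩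
    · rcases le_total c (f x) with hcx | hcx
      · exact Or.inr ⟨x, List.mem_cons_self, by rw [h, max_eq_right hcx]⟩
      · exact Or.inl (by rw [h, max_eq_left hcx])
    · exact Or.inr ⟨e, List.mem_cons_of_mem _ he, hev⟩

lemma ofList_ne_nil (engines : List String) (hne : engines ≠ []) :
    PySem.Set.ofList engines ≠ [] := by
  cases engines with
  | nil => exact absurd rfl hne
  | cons x xs => rw [PySem.Set.ofList_cons]; exact List.cons_ne_nil _ _

-- B's per-query value equals A's per-query value (engines nonempty)
lemma value_eq (engines queries : List String) (q : Nat) (hne : engines ≠ []) :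
    pyMaxD ((PySem.Set.ofList engines).map (fun e => ((nxtIdx queries e q : Int)))) - q
      = engines.foldl (fun L e => max L ((nxtIdx queries e q : Int) - q)) 0 := by
  set f : String → Int := fun e => ((nxtIdx queries e q : Int)) with hf
  obtain ⟨e0, rest, hneed⟩ : ∃ e0 rest, PySem.Set.ofList engines = e0 :: rest := by
    cases h : PySem.Set.ofList engines with
    | nil => exact absurd h (ofList_ne_nil engines hne)
    | cons a t => exact ⟨a, t, rfl⟩
  have hmemneed : ∀ e, e ∈ PySem.Set.ofList engines ↔ e ∈ engines := by
    intro e; simp [PySem.Set.mem_ofList]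
  have hfq : ∀ e, (q : Int) ≤ f e := by
    intro e
    have h := nxtIdx_ge queries e q
    simp only [hf]
    exact_mod_cast h
  rw [hneed, List.map_cons, pyMaxD, List.foldl_map]
  set B := rest.foldl (fun m e => max m (f e)) (f e0) with hB
  set A := engines.foldl (fun L e => max L (f e - q)) 0 with hA
  have hBfacts := PySem.List.le_foldl_max_int rest f (f e0)
  have hAfacts := PySem.List.le_foldl_max_int engines (fun e => f e - q) 0
  have hABle : A ≤ B - q := by
    rcases foldl_max_proj_mem engines (fun e => f e - q) 0 with h0 | ⟨e, he, hev⟩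
    · rw [← hA] at h0
      have := hfq e0
      have := hBfacts.1
      omega
    · rw [← hA] at hev
      have heneed : e ∈ (e0 :: rest) := by rw [← hneed]; exact (hmemneed e).2 he
      rcases List.mem_cons.1 heneed with rfl | hr
      · have := hBfacts.1; omega
      · have := hBfacts.2 e hr; omega
  have hBAle : B - q ≤ A := by
    rcases foldl_max_proj_mem rest f (f e0) with h0 | ⟨e, he, hev⟩
    · rw [← hB] at h0
      have he0 : e0 ∈ engines := (hmemneed e0).1 (by rw [hneed]; exact List.mem_cons_self)
      have := hAfacts.2 e0 he0
      omega
    · rw [← hB] at hev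
      have heeng : e ∈ engines := (hmemneed e).1 (by rw [hneed]; exact List.mem_cons_of_mem _ he)
      have := hAfacts.2 e heeng
      omega
  omega

-- the dict invariant: after processing suffix q.., getD e len = nxtIdx e q for every needed e
def DInv (queries : List String) (need : List String) (d : PySem.Dict String Int) (q : Nat) : Prop :=
  ∀ e ∈ need, d.getD e (queries.length : Int) = (nxtIdx queries e q : Int)

lemma bLoop_eq (engines queries : List String) (hne : engines ≠ []) :
    ∀ (q : Nat), q ≤ queries.length → ∀ (res : List Int) (d : PySem.Dict String Int),
    DInv queries (PySem.Set.ofList engines) d q →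
    ((PySem.List.pyRange ((q : Int) - 1) (-1) (-1)).foldl
      (fun (acc : List Int × PySem.Dict String Int) q' =>
        let x := PySem.List.pyGetD queries q' ""
        let nxt := if PySem.Set.contains (PySem.Set.ofList engines) x then acc.2.insert x q' else acc.2
        let best := pyMaxD ((PySem.Set.ofList engines).map (fun e => nxt.getD e (queries.length : Int)))
        (acc.1 ++ [best - q'], nxt))
      (res, d)).1
    = res ++ (((List.range q).map (fun q' =>
        engines.foldl (fun L e => max L ((nxtIdx queries e q' : Int) - q')) 0)).reverse) := by
  intro q
  induction q with
  | zero =>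
    intro _ res d _
    rw [PySem.List.pyRange_neg_one_eq_nil (by omega)]
    simp
  | succ q ih =>
    intro hq res d hInv
    have hqlt : q < queries.length := by omega
    have hstep : ((q + 1 : Nat) : Int) - 1 = (q : Nat) := by push_cast; ring
    rw [hstep, PySem.List.pyRange_neg_one_cons (by omega), List.foldl_cons]
    simp only
    have hget : PySem.List.pyGetD queries ((q : Nat) : Int) "" = queries[q] := by
      rw [PySem.List.pyGetD_natCast]
      exact List.getD_eq_getElem _ _ hqlt
    rw [hget]
    set x := queries[q] with hx
    set nxt := if PySem.Set.contains (PySem.Set.ofList engines) x then d.insert x (q : Int) else d with hnxt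
    have hInv' : DInv queries (PySem.Set.ofList engines) nxt q := by
      intro e he
      rw [nxtIdx_rec queries e q hqlt]
      by_cases hc : PySem.Set.contains (PySem.Set.ofList engines) x
      · rw [hnxt, if_pos hc, PySem.Dict.getD_insert]
        by_cases hex : e = x
        · rw [if_pos hex, if_pos (by rw [← hx, hex])]
        · rw [if_neg hex, if_neg (by rw [← hx]; exact fun h => hex h.symm), hInv e he]
      · have hxnot : x ∉ PySem.Set.ofList engines := by
          intro hmem
          exact hc ((PySem.Set.contains_iff _ _).2 hmem)
        have hex : queries[q] ≠ e := by
          intro h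
          apply hxnot
          rw [hx, h]
          exact he
        rw [hnxt, if_neg hc, if_neg hex, hInv e he]
    have hbest : pyMaxD ((PySem.Set.ofList engines).map (fun e => nxt.getD e (queries.length : Int)))
        = pyMaxD ((PySem.Set.ofList engines).map (fun e => ((nxtIdx queries e q : Int)))) := by
      congr 1
      exact List.map_congr_left (fun e he => hInv' e he)
    rw [hbest]
    rw [ih (by omega) (res ++ [pyMaxD ((PySem.Set.ofList engines).map (fun e => ((nxtIdx queries e q : Int)))) - (q : Nat)]) nxt hInv']
    rw [value_eq engines queries q hne]
    rw [List.range_succ, List.map_append, List.reverse_append]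
    simp

theorem count_jumps_eq (engines queries : List String) :
    count_jumps engines queries = count_jumps_alt engines queries := by
  by_cases hE : engines = []
  · subst hE
    unfold count_jumps count_jumps_alt
    simp only [PySem.List.len_eq, List.length_nil, Nat.cast_zero]
    rw [PySem.List.foldl_append_singleton_eq_map]
    rw [PySem.List.pyRange_one_eq_nil (b := (0 : Int)) le_rfl]
    simp only [List.foldl_nil, List.nil_append]
    have : PySem.Set.ofList ([] : List String) = [] := rfl
    simp only [this, List.isEmpty_nil, if_true]
    rw [PySem.List.pyRepeat_singleton]
    rw [PySem.List.pyRange_zero_nat queries.length]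
    rw [List.map_map]
    simp [Function.comp_def, List.map_const']
  · unfold count_jumps count_jumps_alt
    simp only [PySem.List.len_eq]
    rw [PySem.List.foldl_append_singleton_eq_map]
    rw [PySem.List.pyRange_zero_nat queries.length, List.map_map, List.nil_append]
    have hA : ∀ q ∈ List.range queries.length,
        ((fun q => (PySem.List.pyRange 0 (engines.length : Int) 1).foldl (fun longest i =>
          aInner (PySem.List.pyGetD engines i "") queries q
            (PySem.List.pyRange q (queries.length : Int) 1) longest) 0) ∘ (fun k : Nat => (k : Int))) q
        = engines.foldl (fun L e => max L ((nxtIdx queries e q : Int) - q)) 0 := by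
      intro q hqmem
      have hq : q ≤ queries.length := le_of_lt (List.mem_range.1 hqmem)
      exact aMiddle_eq engines queries q hq
    rw [List.map_congr_left hA]
    have hnotempty : (PySem.Set.ofList engines).isEmpty = false := by
      rw [List.isEmpty_eq_false_iff]
      exact ofList_ne_nil engines hE
    rw [hnotempty]
    simp only [Bool.false_eq_true, if_false]
    have hInv0 : DInv queries (PySem.Set.ofList engines) PySem.Dict.empty queries.length := by
      intro e _
      rw [PySem.Dict.getD_empty, nxtIdx_len]
    have := bLoop_eq engines queries hE queries.length le_rfl [] PySem.Dict.empty hInv0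
    rw [this]
    simp

-- ===== VERDICT (by name: the statement is the Claim_ definition above) =====
theorem count_jumps_spec : Claim_equal_count_jumps := by
  intro engines queries _
  unfold Spec_count_jumps
  exact count_jumps_eq engines queries
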